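-- pv_equiv track=rewrite | github.com/cp2k/cp2k | src/dbcsr/libsmm_acc/libcusmm/kernels/cusmm_dnt_tiny.py | promising_parameters
-- ===== SOURCE A (Python) =====
-- def promising_parameters(m, n, k):
--     params = []
--     for minblocks in (7, 8, 14, 28):              # heuristic: kernel dependent optimum
--         for grouping in range(1, 33, 1):          # soft: divide stack work in chunks of grouping + the rest
--             for threads in (16, 32, 64):          # heuristic: not more than 2 warps per SM (sm_60)
--                 if (m * n > threads):
--                    continue                       # hard: not enough threads to cover result matrix
--
--                 buf_sz = k * (m + n)
--                 sizeof_int = 4; sizeof_double = 8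
--                 smem_tot = buf_sz * sizeof_double + 3 * grouping * sizeof_int
--                 if (smem_tot * minblocks > 48 * 1024): # hard: see cudaFuncSetCacheConfig() docu
--                    continue                       # hard: uses too much shared memory
--
--                 params.append({'m':m, 'n':n, 'k':k,
--                                'threads':threads,
--                                'grouping':grouping,
--                                'minblocks':minblocks})
--     return(params)
-- ===== SOURCE B (Python) =====
-- def promising_parameters(m, n, k):
--     # Closed form: keep grouping iff (k*(m+n)*8 + 12*grouping)*minblocks <= 48*1024,
--     # i.e. grouping <= gmax = (48*1024 - k*(m+n)*8*minblocks) // (12*minblocks).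
--     threads_ok = [t for t in (16, 32, 64) if m * n <= t]
--     buf_sz = k * (m + n)
--     params = []
--     for minblocks in (7, 8, 14, 28):
--         gmax = (48 * 1024 - buf_sz * 8 * minblocks) // (12 * minblocks)
--         for grouping in range(1, min(32, gmax) + 1):
--             for threads in threads_ok:
--                 params.append({'m': m, 'n': n, 'k': k,
--                                'threads': threads,
--                                'grouping': grouping,
--                                'minblocks': minblocks})
--     return params
-- ===== Notes on version B (the rewrite author's own statement) =====
-- stated objective: alternative
-- what changed: The per-iteration shared-memory test is solved in closed form: B computes gmax = (48*1024 - k*(m+n)*8*minblocks)//(12*minblocks) once per minblocks and iterates grouping over range(1, min(32, gmax)+1), with the thread filter hoisted out of all loops, so the inner loops carry no conditionals.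
import Mathlib
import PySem

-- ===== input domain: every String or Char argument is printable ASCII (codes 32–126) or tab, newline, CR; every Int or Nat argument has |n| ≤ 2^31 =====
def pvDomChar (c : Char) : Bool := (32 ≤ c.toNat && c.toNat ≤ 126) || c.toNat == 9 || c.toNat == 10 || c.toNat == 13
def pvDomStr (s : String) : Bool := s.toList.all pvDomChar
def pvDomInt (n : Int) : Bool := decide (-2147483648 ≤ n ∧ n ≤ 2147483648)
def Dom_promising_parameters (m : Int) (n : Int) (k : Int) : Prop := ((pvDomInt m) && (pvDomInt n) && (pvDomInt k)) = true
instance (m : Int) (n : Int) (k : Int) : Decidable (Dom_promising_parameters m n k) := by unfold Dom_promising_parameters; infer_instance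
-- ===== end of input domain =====

-- B replaces A's per-iteration shared-memory test by a closed-form bound on `grouping`
-- (one floor division per minblocks) and hoists the thread filter out of the loops (objective: alternative).

-- ===== PORT A =====
def promising_parameters (m : Int) (n : Int) (k : Int) : List (List (String × Int)) :=
  [(7 : Int), 8, 14, 28].foldl (fun params minblocks =>
    (PySem.List.pyRange 1 33 1).foldl (fun params grouping =>
      [(16 : Int), 32, 64].foldl (fun params threads =>
        if m * n > threads then params
        else
          let buf_sz := k * (m + n)
          let sizeof_int : Int := 4
          let sizeof_double : Int := 8
          let smem_tot := buf_sz * sizeof_double + 3 * grouping * sizeof_int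
          if smem_tot * minblocks > 48 * 1024 then params
          else params ++ [[("m", m), ("n", n), ("k", k), ("threads", threads),
                           ("grouping", grouping), ("minblocks", minblocks)]]
      ) params
    ) params
  ) []

-- ===== PORT B =====
def promising_parameters_alt (m : Int) (n : Int) (k : Int) : List (List (String × Int)) :=
  let threads_ok := [(16 : Int), 32, 64].filter (fun t => decide (m * n ≤ t))
  let buf_sz := k * (m + n)
  [(7 : Int), 8, 14, 28].foldl (fun params minblocks =>
    let gmax := PySem.Int.floordiv (48 * 1024 - buf_sz * 8 * minblocks) (12 * minblocks)
    (PySem.List.pyRange 1 (min 32 gmax + 1) 1).foldl (fun params grouping =>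
      threads_ok.foldl (fun params threads =>
        params ++ [[("m", m), ("n", n), ("k", k), ("threads", threads),
                    ("grouping", grouping), ("minblocks", minblocks)]]
      ) params
    ) params
  ) []

-- ===== PRECONDITION & SPEC =====
def Spec_promising_parameters (m : Int) (n : Int) (k : Int) (out : List (List (String × Int))) : Prop := out = promising_parameters_alt m n k
instance (m : Int) (n : Int) (k : Int) (out : List (List (String × Int))) : Decidable (Spec_promising_parameters m n k out) := by unfold Spec_promising_parameters; infer_instance

-- ===== CLAIM (what is proved, stated in full; the proofs are below) =====
def Claim_equal_promising_parameters : Prop := ∀ (m : Int) (n : Int) (k : Int), Dom_promising_parameters m n k → Spec_promising_parameters m n k (promising_parameters m n k)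

-- ===== LEMMAS AND PROOFS =====

-- the record both programs append for a given (threads, grouping, minblocks)
def pvEnt (m n k t g mb : Int) : List (String × Int) :=
  [("m", m), ("n", n), ("k", k), ("threads", t), ("grouping", g), ("minblocks", mb)]

-- the shared-memory inequality in closed form: keeping a grouping g is exactly g ≤ gmax
lemma cond_iff (B g mb : Int) (hmb : 0 < mb) :
    (¬ (B * 8 + 3 * g * 4) * mb > 48 * 1024) ↔
      g ≤ PySem.Int.floordiv (48 * 1024 - B * 8 * mb) (12 * mb) := by
  rw [PySem.Int.le_floordiv_iff_mul_le (by omega)]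
  constructor <;> intro h <;> nlinarith

-- guarded flatMap over 1..32 equals plain flatMap over 1..min 32 L
lemma flatMap_range_if (L : Int) (body : Int → List (List (String × Int))) :
    (PySem.List.pyRange 1 33 1).flatMap (fun g => if g ≤ L then body g else [])
    = (PySem.List.pyRange 1 (min 32 L + 1) 1).flatMap body := by
  by_cases hL : 32 ≤ L
  · have hmin : min 32 L = 32 := by omega
    rw [hmin]
    refine List.flatMap_congr ?_
    intro g hg
    rw [PySem.List.mem_pyRange_one] at hg
    rw [if_pos (by omega)]
  · have hmin : min 32 L = L := by omega
    by_cases hL0 : L ≤ 0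
    · rw [hmin, PySem.List.pyRange_one_eq_nil (by omega : (L + 1 : Int) ≤ 1)]
      simp only [List.flatMap_nil]
      rw [List.flatMap_eq_nil_iff]
      intro g hg
      rw [PySem.List.mem_pyRange_one] at hg
      rw [if_neg (by omega)]
    · rw [hmin, PySem.List.pyRange_one_append 1 (L + 1) 33 (by omega) (by omega),
        List.flatMap_append]
      have h1 : (PySem.List.pyRange 1 (L + 1) 1).flatMap (fun g => if g ≤ L then body g else [])
          = (PySem.List.pyRange 1 (L + 1) 1).flatMap body := by
        refine List.flatMap_congr ?_
        intro g hg
        rw [PySem.List.mem_pyRange_one] at hg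
        rw [if_pos (by omega)]
      have h2 : (PySem.List.pyRange (L + 1) 33 1).flatMap (fun g => if g ≤ L then body g else [])
          = [] := by
        rw [List.flatMap_eq_nil_iff]
        intro g hg
        rw [PySem.List.mem_pyRange_one] at hg
        rw [if_neg (by omega)]
      rw [h1, h2, List.append_nil]

-- A's inner threads loop for a fixed grouping: the shared-memory test is
-- independent of `threads`, so it factors out of the loop
theorem inner_threads (m n k g mb : Int) (p : List (List (String × Int))) :
    [(16 : Int), 32, 64].foldl (fun p t =>
        if m * n > t then p
        else if (k * (m + n) * 8 + 3 * g * 4) * mb > 48 * 1024 then p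
        else p ++ [pvEnt m n k t g mb]) p
    = p ++ (if (k * (m + n) * 8 + 3 * g * 4) * mb > 48 * 1024 then []
            else ([(16 : Int), 32, 64].filter (fun t => decide (m * n ≤ t))).map
                   (fun t => pvEnt m n k t g mb)) := by
  rcases (by omega : m * n ≤ 16 ∨ (16 < m * n ∧ m * n ≤ 32) ∨ (32 < m * n ∧ m * n ≤ 64) ∨ 64 < m * n)
    with h | ⟨h1, h2⟩ | ⟨h1, h2⟩ | h
  · simp only [List.foldl, List.filter, decide_eq_true h, decide_eq_true (show m * n ≤ 32 by omega),
      decide_eq_true (show m * n ≤ 64 by omega)]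
    split_ifs <;> first | rfl | omega | simp
  · simp only [List.foldl, List.filter, decide_eq_false (show ¬ m * n ≤ 16 by omega),
      decide_eq_true h2, decide_eq_true (show m * n ≤ 64 by omega)]
    split_ifs <;> first | rfl | omega | simp
  · simp only [List.foldl, List.filter, decide_eq_false (show ¬ m * n ≤ 16 by omega),
      decide_eq_false (show ¬ m * n ≤ 32 by omega), decide_eq_true h2]
    split_ifs <;> first | rfl | omega | simp
  · simp only [List.foldl, List.filter, decide_eq_false (show ¬ m * n ≤ 16 by omega),
      decide_eq_false (show ¬ m * n ≤ 32 by omega), decide_eq_false (show ¬ m * n ≤ 64 by omega)]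
    split_ifs <;> first | rfl | omega | simp

-- per-minblocks equality of A's guarded grouping loop and B's truncated-range loop
lemma per_mb (m n k mb : Int) (hmb : 0 < mb) (params : List (List (String × Int))) :
    (PySem.List.pyRange 1 33 1).foldl (fun params grouping =>
      [(16 : Int), 32, 64].foldl (fun params threads =>
        if m * n > threads then params
        else if (k * (m + n) * 8 + 3 * grouping * 4) * mb > 48 * 1024 then params
        else params ++ [pvEnt m n k threads grouping mb]) params) params
    = (PySem.List.pyRange 1 (min 32 (PySem.Int.floordiv (48 * 1024 - k * (m + n) * 8 * mb) (12 * mb)) + 1) 1).foldl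
        (fun params grouping =>
          ([(16 : Int), 32, 64].filter (fun t => decide (m * n ≤ t))).foldl
            (fun params threads => params ++ [pvEnt m n k threads grouping mb]) params) params := by
  have hstep : ∀ (p : List (List (String × Int))) (g : Int),
      [(16 : Int), 32, 64].foldl (fun p t =>
        if m * n > t then p
        else if (k * (m + n) * 8 + 3 * g * 4) * mb > 48 * 1024 then p
        else p ++ [pvEnt m n k t g mb]) p
      = p ++ (if g ≤ PySem.Int.floordiv (48 * 1024 - k * (m + n) * 8 * mb) (12 * mb)
              then ([(16 : Int), 32, 64].filter (fun t => decide (m * n ≤ t))).map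
                     (fun t => pvEnt m n k t g mb)
              else []) := by
    intro p g
    rw [inner_threads]
    by_cases hC : (k * (m + n) * 8 + 3 * g * 4) * mb > 48 * 1024
    · rw [if_pos hC, if_neg (by rw [← cond_iff (k * (m + n)) g mb hmb]; simpa using hC)]
    · rw [if_neg hC, if_pos ((cond_iff (k * (m + n)) g mb hmb).mp hC)]
  calc (PySem.List.pyRange 1 33 1).foldl (fun params grouping =>
      [(16 : Int), 32, 64].foldl (fun params threads =>
        if m * n > threads then params
        else if (k * (m + n) * 8 + 3 * grouping * 4) * mb > 48 * 1024 then params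
        else params ++ [pvEnt m n k threads grouping mb]) params) params
      = (PySem.List.pyRange 1 33 1).foldl (fun p g =>
          p ++ (if g ≤ PySem.Int.floordiv (48 * 1024 - k * (m + n) * 8 * mb) (12 * mb)
                then ([(16 : Int), 32, 64].filter (fun t => decide (m * n ≤ t))).map
                       (fun t => pvEnt m n k t g mb)
                else [])) params := by
        apply PySem.List.foldl_congr_mem
        intro p g _
        exact hstep p g
    _ = params ++ (PySem.List.pyRange 1 33 1).flatMap (fun g =>
          if g ≤ PySem.Int.floordiv (48 * 1024 - k * (m + n) * 8 * mb) (12 * mb)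
          then ([(16 : Int), 32, 64].filter (fun t => decide (m * n ≤ t))).map
                 (fun t => pvEnt m n k t g mb)
          else []) := PySem.List.foldl_append_eq_flatMap _ _ _
    _ = params ++ (PySem.List.pyRange 1 (min 32 (PySem.Int.floordiv (48 * 1024 - k * (m + n) * 8 * mb) (12 * mb)) + 1) 1).flatMap
          (fun g => ([(16 : Int), 32, 64].filter (fun t => decide (m * n ≤ t))).map
                 (fun t => pvEnt m n k t g mb)) := by
        rw [flatMap_range_if]
    _ = _ := by
        rw [← PySem.List.foldl_append_eq_flatMap]
        apply PySem.List.foldl_congr_mem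
        intro p g _
        rw [PySem.List.foldl_append_singleton_eq_map]

-- ===== VERDICT (by name: the statement is the Claim_ definition above) =====
theorem promising_parameters_spec : Claim_equal_promising_parameters := by
  intro m n k _
  unfold Spec_promising_parameters
  simp only [promising_parameters, promising_parameters_alt]
  apply PySem.List.foldl_congr_mem
  intro p mb hmb
  simp only [List.mem_cons, List.not_mem_nil, or_false] at hmb
  rcases hmb with rfl | rfl | rfl | rfl
  · simpa only [pvEnt] using per_mb m n k 7 (by norm_num) p
  · simpa only [pvEnt] using per_mb m n k 8 (by norm_num) p
  · simpa only [pvEnt] using per_mb m n k 14 (by norm_num) p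
  · simpa only [pvEnt] using per_mb m n k 28 (by norm_num) p
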